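-- pv_equiv track=rewrite | github.com/shiju2806/Aaire | src/rag_pipeline.py | _infer_document_domain
-- ===== SOURCE A (Python) =====
-- def _infer_document_domain(filename: str, content: str) -> str:
--     """Dynamically infer document domain from filename and content"""
--     filename_lower = filename.lower()
--     content_lower = content.lower()
--
--     # Insurance/Regulatory domain
--     if any(term in filename_lower for term in ['licat', 'insurance', 'regulatory', 'capital']):
--         return 'insurance'
--
--     # Accounting standards domain
--     if any(term in filename_lower for term in ['pwc', 'asc', 'ifrs', 'gaap']) or \
--        any(term in content_lower for term in ['asc ', 'ifrs', 'accounting standard']):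
--         return 'accounting_standards'
--
--     # Foreign currency domain
--     if any(term in filename_lower for term in ['foreign', 'currency', 'fx']) or \
--        any(term in content_lower for term in ['foreign currency', 'exchange rate']):
--         return 'foreign_currency'
--
--     # Actuarial domain
--     if any(term in filename_lower for term in ['actuarial', 'valuation', 'reserves']) or \
--        any(term in content_lower for term in ['actuarial', 'present value', 'discount rate']):
--         return 'actuarial'
--
--     return 'general'
-- ===== SOURCE B (Python) =====
-- # Inverted keyword index: each keyword maps to the priority of its domain; the
-- # answer is the domain of the minimum-priority keyword hit (first-match order
-- # of A == minimum priority), 'general' if nothing matches.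
-- FN_INDEX = {
--     'licat': 0, 'insurance': 0, 'regulatory': 0, 'capital': 0,
--     'pwc': 1, 'asc': 1, 'ifrs': 1, 'gaap': 1,
--     'foreign': 2, 'currency': 2, 'fx': 2,
--     'actuarial': 3, 'valuation': 3, 'reserves': 3,
-- }
-- CT_INDEX = {
--     'asc ': 1, 'ifrs': 1, 'accounting standard': 1,
--     'foreign currency': 2, 'exchange rate': 2,
--     'actuarial': 3, 'present value': 3, 'discount rate': 3,
-- }
-- DOMAINS = ['insurance', 'accounting_standards', 'foreign_currency', 'actuarial', 'general']
--
-- def _infer_document_domain(filename: str, content: str) -> str: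
--     fl = filename.lower()
--     cl = content.lower()
--     best = 4
--     for t, p in FN_INDEX.items():
--         if t in fl:
--             best = min(best, p)
--     for t, p in CT_INDEX.items():
--         if t in cl:
--             best = min(best, p)
--     return DOMAINS[best]
-- ===== Notes on version B (the rewrite author's own statement) =====
-- stated objective: alternative
-- what changed: Replaced the ordered first-match branch chain with an inverted keyword->priority index: a single min-accumulating scan over all keywords picks the lowest-priority hit and indexes into a domain table.
import Mathlib
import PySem

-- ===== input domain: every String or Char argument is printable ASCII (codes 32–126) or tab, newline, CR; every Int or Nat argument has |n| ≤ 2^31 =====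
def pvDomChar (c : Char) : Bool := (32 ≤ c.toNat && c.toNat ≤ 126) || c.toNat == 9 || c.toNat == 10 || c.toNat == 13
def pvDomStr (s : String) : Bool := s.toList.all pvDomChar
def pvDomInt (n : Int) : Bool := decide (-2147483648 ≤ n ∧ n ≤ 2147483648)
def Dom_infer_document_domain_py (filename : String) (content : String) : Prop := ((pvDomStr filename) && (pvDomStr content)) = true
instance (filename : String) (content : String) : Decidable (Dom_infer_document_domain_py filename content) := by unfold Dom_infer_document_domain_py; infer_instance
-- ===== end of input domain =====

-- B replaces A's ordered branch chain by an inverted keyword->priority index scanned once with a min accumulator (alternative decomposition; same cost). DOMAINS[best] is ported as List.getD, exact since 0 ≤ best ≤ 4.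


-- ===== PORT A =====
def infer_document_domain_py (filename : String) (content : String) : String :=
  let filename_lower := PySem.Str.lower filename
  let content_lower := PySem.Str.lower content
  if (["licat", "insurance", "regulatory", "capital"].any (fun term => PySem.Str.isIn term filename_lower)) then
    "insurance"
  else if (["pwc", "asc", "ifrs", "gaap"].any (fun term => PySem.Str.isIn term filename_lower)) ||
          (["asc ", "ifrs", "accounting standard"].any (fun term => PySem.Str.isIn term content_lower)) then
    "accounting_standards"
  else if (["foreign", "currency", "fx"].any (fun term => PySem.Str.isIn term filename_lower)) ||
          (["foreign currency", "exchange rate"].any (fun term => PySem.Str.isIn term content_lower)) then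
    "foreign_currency"
  else if (["actuarial", "valuation", "reserves"].any (fun term => PySem.Str.isIn term filename_lower)) ||
          (["actuarial", "present value", "discount rate"].any (fun term => PySem.Str.isIn term content_lower)) then
    "actuarial"
  else
    "general"

-- ===== PORT B =====
-- B-side: inverted keyword -> priority indexes (dicts in Source B, iterated in insertion order)
def pvFnIndex : List (String × Nat) :=
  [("licat", 0), ("insurance", 0), ("regulatory", 0), ("capital", 0),
   ("pwc", 1), ("asc", 1), ("ifrs", 1), ("gaap", 1),
   ("foreign", 2), ("currency", 2), ("fx", 2),
   ("actuarial", 3), ("valuation", 3), ("reserves", 3)]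

def pvCtIndex : List (String × Nat) :=
  [("asc ", 1), ("ifrs", 1), ("accounting standard", 1),
   ("foreign currency", 2), ("exchange rate", 2),
   ("actuarial", 3), ("present value", 3), ("discount rate", 3)]

def pvLabels : List String :=
  ["insurance", "accounting_standards", "foreign_currency", "actuarial", "general"]

-- one loop step: if the keyword occurs in s, lower the running best priority
def pvStep (s : String) (best : Nat) (tp : String × Nat) : Nat :=
  if PySem.Str.isIn tp.1 s then min best tp.2 else best

def infer_document_domain_py_alt (filename : String) (content : String) : String :=
  let fl := PySem.Str.lower filename
  let cl := PySem.Str.lower content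
  let best := pvCtIndex.foldl (pvStep cl) (pvFnIndex.foldl (pvStep fl) 4)
  -- DOMAINS[best]: always in range (0 ≤ best ≤ 4), so getD is exact Python indexing
  pvLabels.getD best "general"

-- ===== PRECONDITION & SPEC =====
def Spec_infer_document_domain_py (filename : String) (content : String) (out : String) : Prop := out = infer_document_domain_py_alt filename content
instance (filename : String) (content : String) (out : String) : Decidable (Spec_infer_document_domain_py filename content out) := by unfold Spec_infer_document_domain_py; infer_instance

-- ===== CLAIM (what is proved, stated in full; the proofs are below) =====
def Claim_equal_infer_document_domain_py : Prop := ∀ (filename : String) (content : String), Dom_infer_document_domain_py filename content → Spec_infer_document_domain_py filename content (infer_document_domain_py filename content)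

-- ===== LEMMAS AND PROOFS =====

-- folding a constant-priority keyword group = "if any keyword matches, min in its priority"
theorem pvStep_fold_const (s : String) (p : Nat) (ts : List String) (acc : Nat) :
    (ts.map (fun t => (t, p))).foldl (pvStep s) acc
      = if ts.any (fun t => PySem.Str.isIn t s) then min acc p else acc := by
  induction ts generalizing acc with
  | nil => simp
  | cons t ts ih =>
    simp only [List.map_cons, List.foldl_cons, List.any_cons, pvStep]
    rw [ih]
    rcases Bool.dichotomy (PySem.Str.isIn t s) with h | h <;>
      rcases Bool.dichotomy (ts.any fun t => PySem.Str.isIn t s) with h2 | h2 <;>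
        simp only [h, h2, Bool.false_or, Bool.true_or, if_true, if_false,
          Bool.false_eq_true] <;> omega

theorem pvFnIndex_groups : pvFnIndex =
    (["licat", "insurance", "regulatory", "capital"].map (fun t => (t, 0)))
    ++ (["pwc", "asc", "ifrs", "gaap"].map (fun t => (t, 1)))
    ++ (["foreign", "currency", "fx"].map (fun t => (t, 2)))
    ++ (["actuarial", "valuation", "reserves"].map (fun t => (t, 3))) := rfl

theorem pvCtIndex_groups : pvCtIndex =
    (["asc ", "ifrs", "accounting standard"].map (fun t => (t, 1)))
    ++ (["foreign currency", "exchange rate"].map (fun t => (t, 2)))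
    ++ (["actuarial", "present value", "discount rate"].map (fun t => (t, 3))) := rfl

-- ===== VERDICT (by name: the statement is the Claim_ definition above) =====
theorem infer_document_domain_py_spec : Claim_equal_infer_document_domain_py := by
  intro filename content _
  unfold Spec_infer_document_domain_py infer_document_domain_py infer_document_domain_py_alt
  rw [pvFnIndex_groups, pvCtIndex_groups]
  simp only [List.foldl_append, pvStep_fold_const]
  generalize (["licat", "insurance", "regulatory", "capital"].any
      (fun t => PySem.Str.isIn t (PySem.Str.lower filename))) = g0
  generalize (["pwc", "asc", "ifrs", "gaap"].any
      (fun t => PySem.Str.isIn t (PySem.Str.lower filename))) = g1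
  generalize (["foreign", "currency", "fx"].any
      (fun t => PySem.Str.isIn t (PySem.Str.lower filename))) = g2
  generalize (["actuarial", "valuation", "reserves"].any
      (fun t => PySem.Str.isIn t (PySem.Str.lower filename))) = g3
  generalize (["asc ", "ifrs", "accounting standard"].any
      (fun t => PySem.Str.isIn t (PySem.Str.lower content))) = h1
  generalize (["foreign currency", "exchange rate"].any
      (fun t => PySem.Str.isIn t (PySem.Str.lower content))) = h2
  generalize (["actuarial", "present value", "discount rate"].any
      (fun t => PySem.Str.isIn t (PySem.Str.lower content))) = h3
  revert g0 g1 g2 g3 h1 h2 h3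
  decide
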